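-- pv_equiv track=rewrite | github.com/pypi-data/pypi-mirror-85 | packages/simses/simses-0.1.8.tar.gz/simses-0.1.8/simses/config/simulation/simulation_config.py | create_dict_from
-- ===== SOURCE A (Python) =====
-- def create_dict_from(properties: [str], delimiter: str = ',') -> dict:
--     res: dict = dict()
--     for prop in properties:
--         items: list = prop.split(delimiter)
--         name: str = items.pop(0)
--         if name in res.keys():
--             raise Exception(name + ' is not unique. Please check your config file.')
--         res[name] = items
--     return res
-- ===== SOURCE B (Python) =====
-- def create_dict_from(properties, delimiter=','):
--     parts = [prop.split(delimiter) for prop in properties]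
--     seen = set()
--     for p in parts:
--         if p[0] in seen:
--             raise Exception(p[0] + ' is not unique. Please check your config file.')
--         seen.add(p[0])
--     return {p[0]: p[1:] for p in parts}
-- ===== Notes on version B (the rewrite author's own statement) =====
-- stated objective: alternative
-- what changed: Split A's single interleaved loop into three passes: precompute all splits, validate name uniqueness against a seen-set, then build the dict in one comprehension (no dict mutated while checking).
import Mathlib
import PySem

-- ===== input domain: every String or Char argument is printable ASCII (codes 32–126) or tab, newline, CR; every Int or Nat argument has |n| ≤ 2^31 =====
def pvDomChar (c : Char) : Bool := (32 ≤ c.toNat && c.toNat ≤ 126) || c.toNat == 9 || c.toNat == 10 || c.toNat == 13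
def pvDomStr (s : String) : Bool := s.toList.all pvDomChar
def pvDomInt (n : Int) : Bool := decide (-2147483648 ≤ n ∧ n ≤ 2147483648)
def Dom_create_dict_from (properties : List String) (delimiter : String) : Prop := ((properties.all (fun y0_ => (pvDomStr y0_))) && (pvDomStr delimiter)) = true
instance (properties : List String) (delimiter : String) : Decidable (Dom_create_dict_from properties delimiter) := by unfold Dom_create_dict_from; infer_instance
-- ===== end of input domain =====

-- B restructures A's single interleaved loop into three passes (split, validate, build); same cost, no speed claim.

-- ===== PORT A =====
-- A's loop: split each prop, pop the name, check membership in the dict built so far, insert.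
def pvALoop (delimiter : String) : List String → PySem.Dict String (List String) → PySem.Dict String (List String)
  | [], res => res
  | prop :: rest, res =>
    match PySem.Str.split? prop delimiter with
    | none => res        -- prop.split('') raises ValueError; unreached under Pre_
    | some items =>
      let name := items.headI          -- items.pop(0); split never returns []
      let items := items.tail
      if res.contains name then res    -- raise Exception(name + ' is not unique…'); unreached under Pre_
      else pvALoop delimiter rest (res.insert name items)

def create_dict_from (properties : List String) (delimiter : String) : List (String × List String) :=
  (pvALoop delimiter properties PySem.Dict.empty).items

-- ===== PORT B =====
-- B pass 2: scan the precomputed parts with a seen-set, true = a duplicate name was found (raise).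
def pvFindDup : List (List String) → PySem.Set String → Bool
  | [], _ => false
  | p :: rest, seen =>
    if PySem.Set.contains seen p.headI then true
    else pvFindDup rest (PySem.Set.add seen p.headI)

def create_dict_from_alt (properties : List String) (delimiter : String) : List (String × List String) :=
  let parts := properties.map (fun prop => (PySem.Str.split? prop delimiter).getD [])
  -- '.getD []' is the ValueError path of split(''); unreached under Pre_
  if pvFindDup parts PySem.Set.empty then []   -- raise path; unreached under Pre_
  else (parts.foldl (fun d p => d.insert p.headI p.tail) PySem.Dict.empty).items

-- ===== PRECONDITION & SPEC =====
-- Pre_ excludes exactly the inputs where A raises: an empty delimiter actually used on some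
-- property (ValueError from split), and duplicate names (the explicit Exception).
def Pre_create_dict_from (properties : List String) (delimiter : String) : Prop :=
  (properties = [] ∨ delimiter ≠ "") ∧
  (properties.map (fun prop => ((PySem.Str.split? prop delimiter).getD []).headI)).Nodup
instance (properties : List String) (delimiter : String) : Decidable (Pre_create_dict_from properties delimiter) := by unfold Pre_create_dict_from; infer_instance
def pvWitness_create_dict_from : List String × String := (["a,1,2", "b,3"], ",")
def Spec_create_dict_from (properties : List String) (delimiter : String) (out : List (String × List String)) : Prop := out = create_dict_from_alt properties delimiter
instance (properties : List String) (delimiter : String) (out : List (String × List String)) : Decidable (Spec_create_dict_from properties delimiter out) := by unfold Spec_create_dict_from; infer_instance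

-- ===== CLAIM (what is proved, stated in full; the proofs are below) =====
def Claim_equal_create_dict_from : Prop := ∀ (properties : List String) (delimiter : String), Dom_create_dict_from properties delimiter → Pre_create_dict_from properties delimiter → Spec_create_dict_from properties delimiter (create_dict_from properties delimiter)

-- ===== LEMMAS AND PROOFS =====

-- split(sep) with a nonempty separator always succeeds.
lemma pvSplit?_isSome (s sep : String) (h : sep ≠ "") :
    ∃ items, PySem.Str.split? s sep = some items := by
  have ht : sep.toList.isEmpty = false := by
    rw [List.isEmpty_eq_false_iff_exists_mem]
    rcases List.exists_mem_of_ne_nil sep.toList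
      (fun hh => h (by simpa using congrArg String.ofList hh)) with ⟨c, hc⟩
    exact ⟨c, hc⟩
  exact ⟨(PySem.Chars.splitOn s.toList sep.toList).map String.ofList,
    by simp [PySem.Str.split?, PySem.Chars.split?, ht]⟩

-- B's validation pass finds no duplicate when the names are distinct and disjoint from `seen`.
lemma pvFindDup_false (parts : List (List String)) (seen : PySem.Set String)
    (hnd : (parts.map (fun p => p.headI)).Nodup)
    (hdisj : ∀ p ∈ parts, PySem.Set.contains seen p.headI = false) :
    pvFindDup parts seen = false := by
  induction parts generalizing seen with
  | nil => rfl
  | cons p rest ih =>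
    simp only [List.map_cons, List.nodup_cons, List.mem_map] at hnd
    simp only [pvFindDup, hdisj p (by simp)]
    refine ih _ hnd.2 (fun q hq => ?_)
    have hne : q.headI ≠ p.headI := fun h => hnd.1 ⟨q, hq, h⟩
    have hmem : q.headI ∉ seen := by simpa using hdisj q (by simp [hq])
    have hout : q.headI ∉ seen.add p.headI := by
      rw [PySem.Set.mem_add]
      rintro (h1 | h2)
      · exact hmem h1
      · exact hne h2
    simpa using hout

-- A's loop never hits the raise branch under distinct fresh names, and equals B's build fold.
lemma pvALoop_eq_foldl (delimiter : String) (hd : delimiter ≠ "")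
    (props : List String) (res : PySem.Dict String (List String))
    (hnd : (props.map (fun prop => ((PySem.Str.split? prop delimiter).getD []).headI)).Nodup)
    (hfresh : ∀ prop ∈ props,
      res.contains (((PySem.Str.split? prop delimiter).getD []).headI) = false) :
    pvALoop delimiter props res =
      (props.map (fun prop => (PySem.Str.split? prop delimiter).getD [])).foldl
        (fun d p => d.insert p.headI p.tail) res := by
  induction props generalizing res with
  | nil => rfl
  | cons prop rest ih =>
    obtain ⟨items, hit⟩ := pvSplit?_isSome prop delimiter hd
    simp only [List.map_cons, List.nodup_cons, List.mem_map] at hnd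
    have h0 := hfresh prop (by simp)
    simp only [hit, Option.getD_some] at h0
    simp only [pvALoop, hit, List.map_cons, List.foldl_cons, Option.getD_some, h0,
      Bool.false_eq_true, if_false]
    refine ih _ hnd.2 (fun q hq => ?_)
    have hne : ((PySem.Str.split? q delimiter).getD []).headI ≠ items.headI := by
      intro h
      exact hnd.1 ⟨q, hq, by rw [hit]; simpa using h⟩
    simp [PySem.Dict.contains_insert, hfresh q (by simp [hq]), hne]

-- ===== VERDICT (by name: the statement is the Claim_ definition above) =====
theorem create_dict_from_spec : Claim_equal_create_dict_from := by
  intro properties delimiter _ hpre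
  obtain ⟨hdel, hnd⟩ := hpre
  unfold Spec_create_dict_from create_dict_from create_dict_from_alt
  rcases hdel with hnil | hd
  · subst hnil; rfl
  · have hfind : pvFindDup (properties.map (fun prop => (PySem.Str.split? prop delimiter).getD []))
        PySem.Set.empty = false := by
      apply pvFindDup_false
      · simpa [List.map_map] using hnd
      · intro p _; rfl
    show _ = if pvFindDup (properties.map fun prop => (PySem.Str.split? prop delimiter).getD [])
        PySem.Set.empty = true then []
      else ((properties.map fun prop => (PySem.Str.split? prop delimiter).getD []).foldl
        (fun d p => d.insert p.headI p.tail) PySem.Dict.empty).items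
    rw [hfind]
    simp only [Bool.false_eq_true, if_false]
    rw [pvALoop_eq_foldl delimiter hd properties PySem.Dict.empty hnd
      (fun prop _ => by simp [PySem.Dict.contains_empty])]
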